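-- pv_equiv track=rewrite | github.com/ChrisKaldis/quboin | src/quboin/knapsack.py | build_knapsack_with_aux
-- ===== SOURCE A (Python) =====
-- from math import log2
--
-- def build_knapsack_with_aux(
--         weights: list[int],
--         profits: list[int],
--         capacity: int,
--         alpha: int = 1,
--         beta: int = 1,
-- ) -> dict[tuple[int, int], int]:
--     """Constructs QUBO matrix for knapsack problem using auxiliary bits.
--
--     Uses a binary encoding of the knapsack capacity constraint via
--     auxiliary bits.
--
--     Args:
--         weights: List with the weight of each item.
--         profits: List with the profit of each item.
--         capacity: Capacity of knapsack.
--         alpha: Penalty coefficient for the constraint.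
--         beta: Coefficient of optimization term.
--
--     Returns:
--         A dictionary representing the QUBO matrix like the
--         `build_knapsack_qubo` function but with additional
--         auxiliary bits.
--     """
--     qubo: dict[tuple[int, int], int] = {}
--     n = len(weights)
--
--     # Number of auxiliary bits
--     m = int(log2(capacity))
--     remainder = capacity - (2**m - 1)
--
--     # Items coefficients
--     for i in range(n):
--         # Diagonal terms
--         qubo[(i, i)] = -beta * profits[i] + alpha * weights[i]**2
--
--         # Off-diagonal terms
--         # Item-item interactions
--         for j in range(i+1, n):
--             qubo[(i, j)] = 2 * alpha * weights[i] * weights[j]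
--
--         # Item-auxiliary bit interactions
--         for k in range(m):
--             qubo[(i, k + n)] = -alpha * weights[i] * (2 ** (k + 1))
--
--         qubo[(i, n + m)] = -2 * alpha * weights[i] * remainder
--
--     # Auxiliary bit coefficients
--     for i in range(m):
--         # Diagonal terms
--         qubo[(i + n, i + n)] = alpha * (2 ** (2 * i))
--
--         # Off-diagonal terms
--         for j in range(i + 1, m):
--             qubo[(i + n, j + n)] = alpha * (2 ** (i + j + 1))
--
--         qubo[(i + n, n + m)] = alpha * (2 ** (i + 1)) * remainder
--
--     qubo[(n + m, n + m)] = alpha * remainder ** 2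
--
--     return qubo
-- ===== SOURCE B (Python) =====
-- def build_knapsack_with_aux(
--         weights: list[int],
--         profits: list[int],
--         capacity: int,
--         alpha: int = 1,
--         beta: int = 1,
-- ) -> dict[tuple[int, int], int]:
--     """Builds the same QUBO by expanding the penalty quadratic form
--     alpha*(sum_u d[u]*x_u)^2 term by term over the full Cartesian product of
--     variable indices, accumulating coefficients in a counter keyed by the
--     (min,max) index pair (x_u^2 = x_u folds squares onto the diagonal), then
--     adding the linear profit terms and sorting the keys at the end."""
--     n = len(weights)
--     m = capacity.bit_length() - 1
--     remainder = capacity - (2 ** m - 1)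
--     # signed constraint coefficients: items, auxiliary powers of two, remainder
--     d = weights + [-(2 ** k) for k in range(m)] + [-remainder]
--     N = n + m + 1
--
--     acc: dict[tuple[int, int], int] = {}
--     for v in range(N):
--         for u in range(N):
--             key = (min(u, v), max(u, v))
--             acc[key] = acc.get(key, 0) + alpha * d[u] * d[v]
--     # linear optimization terms land on the diagonal
--     for i in range(n):
--         acc[(i, i)] = acc.get((i, i), 0) - beta * profits[i]
--     return dict(sorted(acc.items(), key=lambda kv: kv[0]))
-- ===== Notes on version B (the rewrite author's own statement) =====
-- stated objective: alternative
-- what changed: B does not fill the upper-triangular matrix entry by entry like A: it expands the penalty quadratic form alpha*(d.x)^2 symbolically over the full Cartesian product of variable indices, accumulating each pair's contribution into a counter keyed by (min,max) (so every off-diagonal value arises as the sum of two contributions and squares fold onto the diagonal), then adds the linear profit terms and recovers the key order by a final sort instead of by insertion order.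
import Mathlib
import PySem

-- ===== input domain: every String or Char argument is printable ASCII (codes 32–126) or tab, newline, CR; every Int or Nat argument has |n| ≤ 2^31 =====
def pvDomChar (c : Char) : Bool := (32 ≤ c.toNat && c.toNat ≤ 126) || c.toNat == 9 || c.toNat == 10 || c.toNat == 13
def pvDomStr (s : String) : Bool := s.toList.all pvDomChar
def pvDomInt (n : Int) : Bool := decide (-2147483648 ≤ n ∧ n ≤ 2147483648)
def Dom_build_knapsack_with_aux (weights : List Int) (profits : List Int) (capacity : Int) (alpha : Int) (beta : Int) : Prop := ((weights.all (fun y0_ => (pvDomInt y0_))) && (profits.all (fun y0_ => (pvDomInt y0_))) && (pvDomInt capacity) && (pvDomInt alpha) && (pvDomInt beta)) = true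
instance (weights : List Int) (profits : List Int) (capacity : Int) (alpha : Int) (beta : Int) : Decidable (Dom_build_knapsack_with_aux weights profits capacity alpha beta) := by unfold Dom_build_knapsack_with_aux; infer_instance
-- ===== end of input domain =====

-- B builds the same QUBO dict by expanding the penalty quadratic form over the full Cartesian
-- product of variable indices into a coefficient accumulator and sorting the keys at the end,
-- instead of A's four specialized upper-triangular term blocks (objective: alternative).

-- ===== PORT A =====
-- `int(log2(capacity))` is floor(log2 capacity) on the admitted inputs (1 ≤ capacity ≤ 2^31,
-- where the float computation is exact); capacity ≤ 0 raises ValueError (excluded by Pre_).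
-- List indices are in range under Pre_ (profits at least as long as weights), so `getD _ 0`
-- equals Python's indexing on every admitted input.
def build_knapsack_with_aux (weights : List Int) (profits : List Int) (capacity : Int) (alpha : Int) (beta : Int) : List (Int × Int × Int) :=
  let n := weights.length
  let m := Nat.log 2 capacity.toNat
  let remainder : Int := capacity - (2 ^ m - 1)
  let qubo : PySem.Dict (Int × Int) Int := PySem.Dict.empty
  let qubo := (List.range n).foldl (fun q i =>
    let q := q.insert ((i : Int), (i : Int))
      (-beta * profits.getD i 0 + alpha * (weights.getD i 0) ^ 2)
    let q := (List.range' (i+1) (n - (i+1))).foldl (fun q j =>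
      q.insert ((i : Int), (j : Int)) (2 * alpha * weights.getD i 0 * weights.getD j 0)) q
    let q := (List.range m).foldl (fun q k =>
      q.insert ((i : Int), ((k + n : Nat) : Int)) (-alpha * weights.getD i 0 * 2 ^ (k + 1))) q
    q.insert ((i : Int), ((n + m : Nat) : Int)) (-2 * alpha * weights.getD i 0 * remainder)) qubo
  let qubo := (List.range m).foldl (fun q i =>
    let q := q.insert (((i + n : Nat) : Int), ((i + n : Nat) : Int)) (alpha * 2 ^ (2 * i))
    let q := (List.range' (i+1) (m - (i+1))).foldl (fun q j =>
      q.insert (((i + n : Nat) : Int), ((j + n : Nat) : Int)) (alpha * 2 ^ (i + j + 1))) q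
    q.insert (((i + n : Nat) : Int), ((n + m : Nat) : Int)) (alpha * 2 ^ (i + 1) * remainder)) qubo
  let qubo := qubo.insert (((n + m : Nat) : Int), ((n + m : Nat) : Int)) (alpha * remainder ^ 2)
  qubo.items.map (fun kv => (kv.1.1, kv.1.2, kv.2))

-- ===== PORT B =====
-- m = capacity.bit_length() - 1 (PySem.Int.bitLength); d[u] is in range (u < len(d)) wherever
-- read, so `getD _ 0` equals Python's indexing; profits indexing in range for the same reason
-- as in A. `dict(sorted(acc.items(), key=lambda kv: kv[0]))` is Dict.ofList of sorted2 on the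
-- two key components (Python's tuple comparison).
def build_knapsack_with_aux_alt (weights : List Int) (profits : List Int) (capacity : Int) (alpha : Int) (beta : Int) : List (Int × Int × Int) :=
  let n := weights.length
  let m := PySem.Int.bitLength capacity - 1
  let remainder : Int := capacity - (2 ^ m - 1)
  let d : List Int := weights ++ ((List.range m).map (fun k => -(2 ^ k : Int)) ++ [-remainder])
  let N := n + m + 1
  let acc : PySem.Dict (Int × Int) Int := PySem.Dict.empty
  let acc := (List.range N).foldl (fun q v =>
    (List.range N).foldl (fun q u =>
      let key : Int × Int := (((min u v : Nat) : Int), ((max u v : Nat) : Int))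
      q.insert key (q.getD key 0 + alpha * d.getD u 0 * d.getD v 0)) q) acc
  let acc := (List.range n).foldl (fun q i =>
    q.insert ((i : Int), (i : Int)) (q.getD ((i : Int), (i : Int)) 0 - beta * profits.getD i 0)) acc
  (PySem.Dict.ofList (PySem.List.sorted2 acc.items (fun kv => kv.1.1) (fun kv => kv.1.2))).items.map
    (fun kv => (kv.1.1, kv.1.2, kv.2))

-- ===== PRECONDITION & SPEC =====
-- Pre_ excludes exactly the inputs where Python A raises: capacity < 1 (math.log2 raises
-- ValueError) and profits shorter than weights (IndexError on profits[i]).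
def Pre_build_knapsack_with_aux (weights : List Int) (profits : List Int) (capacity : Int) (alpha : Int) (beta : Int) : Prop :=
  1 ≤ capacity ∧ weights.length ≤ profits.length
instance (weights : List Int) (profits : List Int) (capacity : Int) (alpha : Int) (beta : Int) : Decidable (Pre_build_knapsack_with_aux weights profits capacity alpha beta) := by unfold Pre_build_knapsack_with_aux; infer_instance

def pvWitness_build_knapsack_with_aux : List Int × List Int × Int × Int × Int := ([2, 3], [5, 4], 7, 1, 1)

def Spec_build_knapsack_with_aux (weights : List Int) (profits : List Int) (capacity : Int) (alpha : Int) (beta : Int) (out : List (Int × Int × Int)) : Prop := out = build_knapsack_with_aux_alt weights profits capacity alpha beta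
instance (weights : List Int) (profits : List Int) (capacity : Int) (alpha : Int) (beta : Int) (out : List (Int × Int × Int)) : Decidable (Spec_build_knapsack_with_aux weights profits capacity alpha beta out) := by unfold Spec_build_knapsack_with_aux; infer_instance

-- ===== CLAIM (what is proved, stated in full; the proofs are below) =====
def Claim_equal_build_knapsack_with_aux : Prop := ∀ (weights : List Int) (profits : List Int) (capacity : Int) (alpha : Int) (beta : Int), Dom_build_knapsack_with_aux weights profits capacity alpha beta → Pre_build_knapsack_with_aux weights profits capacity alpha beta → Spec_build_knapsack_with_aux weights profits capacity alpha beta (build_knapsack_with_aux weights profits capacity alpha beta)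

-- ===== LEMMAS AND PROOFS =====

/-- The signed constraint coefficient table both sides are about. -/
def pvD (w : List Int) (m : Nat) (rem : Int) : List Int :=
  w ++ ((List.range m).map (fun k => -(2 ^ k : Int)) ++ [-rem])

/-- The common fold step: insert one (key, value) pair. -/
def pvIns (q : PySem.Dict (Int × Int) Int) (kv : (Int × Int) × Int) : PySem.Dict (Int × Int) Int := q.insert kv.1 kv.2

/-- A's insert sequence, flattened to one list of (key, value) pairs. -/
def pvOpsA (w p : List Int) (m : Nat) (rem a b : Int) : List ((Int × Int) × Int) :=
  ((List.range w.length).flatMap (fun (i : Nat) =>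
    (((i : Int), (i : Int)), -b * p.getD i 0 + a * (w.getD i 0) ^ 2)
    :: ((List.range' (i+1) (w.length - (i+1))).map (fun (j : Nat) => (((i : Int), (j : Int)), 2 * a * w.getD i 0 * w.getD j 0))
      ++ ((List.range m).map (fun (k : Nat) => (((i : Int), ((k + w.length : Nat) : Int)), -a * w.getD i 0 * 2 ^ (k + 1)))
      ++ [(((i : Int), ((w.length + m : Nat) : Int)), -2 * a * w.getD i 0 * rem)]))))
  ++ (((List.range m).flatMap (fun (i : Nat) =>
    ((((i + w.length : Nat) : Int), ((i + w.length : Nat) : Int)), a * 2 ^ (2 * i))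
    :: ((List.range' (i+1) (m - (i+1))).map (fun (j : Nat) => ((((i + w.length : Nat) : Int), ((j + w.length : Nat) : Int)), a * 2 ^ (i + j + 1)))
      ++ [((((i + w.length : Nat) : Int), ((w.length + m : Nat) : Int)), a * 2 ^ (i + 1) * rem)])))
  ++ [((((w.length + m : Nat) : Int), ((w.length + m : Nat) : Int)), a * rem ^ 2)])

/-- The row-major (key-sorted) entry list both final dicts hold. -/
def pvRows (w p : List Int) (m : Nat) (rem a b : Int) : List ((Int × Int) × Int) :=
  let d : List Int := pvD w m rem
  (List.range (w.length + m + 1)).flatMap (fun (u : Nat) =>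
    (((u : Int), (u : Int)),
      if u < w.length then a * d.getD u 0 * d.getD u 0 - b * p.getD u 0 else a * d.getD u 0 * d.getD u 0)
    :: (List.range' (u+1) (w.length + m + 1 - (u+1))).map
        (fun (v : Nat) => (((u : Int), (v : Int)), 2 * a * d.getD u 0 * d.getD v 0)))

/-- B's accumulation key: the (min, max) fold of an index pair. -/
def pvKey (x : Nat × Nat) : Int × Int := (((min x.1 x.2 : Nat) : Int), ((max x.1 x.2 : Nat) : Int))

/-- The full Cartesian product of indices B iterates over (inner u, outer v). -/
def pvPairs (N : Nat) : List (Nat × Nat) :=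
  (List.range N).flatMap (fun v => (List.range N).map (fun u => (u, v)))

/-- One contribution of the expanded quadratic form. -/
def pvCoef (d : List Int) (a : Int) (x : Nat × Nat) : Int := a * d.getD x.1 0 * d.getD x.2 0

/-- B's accumulator after the product loop. -/
def pvAcc1 (d : List Int) (a : Int) (N : Nat) : PySem.Dict (Int × Int) Int :=
  (pvPairs N).foldl (fun q x => q.insert (pvKey x) (q.getD (pvKey x) 0 + pvCoef d a x)) PySem.Dict.empty

def pvDKey (i : Nat) : Int × Int := ((i : Int), (i : Int))

/-- B's accumulator after the diagonal (profit) loop. -/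
def pvAcc (d p : List Int) (a b : Int) (n N : Nat) : PySem.Dict (Int × Int) Int :=
  (List.range n).foldl (fun q i => q.insert (pvDKey i) (q.getD (pvDKey i) 0 + -(b * p.getD i 0))) (pvAcc1 d a N)

/-- The upper-triangular key list in row-major (lexicographic) order. -/
def pvKeysRowN (N : Nat) : List (Nat × Nat) :=
  (List.range N).flatMap (fun u => (List.range' u (N - u)).map (fun v => (u, v)))

/-- The final per-key value. -/
def pvVal (d p : List Int) (a b : Int) (n : Nat) (x : Nat × Nat) : Int :=
  if x.1 = x.2 then
    (if x.1 < n then a * d.getD x.1 0 * d.getD x.1 0 - b * p.getD x.1 0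
     else a * d.getD x.1 0 * d.getD x.1 0)
  else 2 * a * d.getD x.1 0 * d.getD x.2 0

/-- Lexicographic sort key of an entry. -/
def pvKeyL (kv : (Int × Int) × Int) : Int ×ₗ Int := toLex (kv.1.1, kv.1.2)

lemma pvA_eq_ops (w p : List Int) (c a b : Int) :
    build_knapsack_with_aux w p c a b =
      ((pvOpsA w p (Nat.log 2 c.toNat) (c - (2 ^ (Nat.log 2 c.toNat) - 1)) a b).foldl pvIns
        PySem.Dict.empty).items.map (fun kv => (kv.1.1, kv.1.2, kv.2)) := by
  simp only [build_knapsack_with_aux, pvOpsA, List.foldl_append, List.foldl_flatMap,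
    List.foldl_cons, List.foldl_nil, List.foldl_map, pvIns]

lemma pvM_eq (c : Int) (hc : 1 ≤ c) : PySem.Int.bitLength c - 1 = Nat.log 2 c.toNat := by
  have hne : c ≠ 0 := by omega
  have h1 := PySem.Int.two_pow_bitLength_le c hne
  have h2 := PySem.Int.lt_two_pow_bitLength c
  have habs : c.natAbs = c.toNat := by omega
  have hpos : 1 ≤ PySem.Int.bitLength c := by
    rcases Nat.eq_zero_or_pos (PySem.Int.bitLength c) with h0 | h0
    · rw [h0] at h2; simp at h2; omega
    · exact h0
  symm
  apply Nat.log_eq_of_pow_le_of_lt_pow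
  · rw [← habs]; exact h1
  · rw [← habs, Nat.sub_add_cancel hpos]; exact h2

lemma pvOps_eq (w p : List Int) (m : Nat) (rem a b : Int) :
    pvOpsA w p m rem a b = pvRows w p m rem a b := by
  simp only [pvOpsA, pvRows]
  set n := w.length with hn
  set d : List Int := pvD w m rem with hd
  have hdw : ∀ u, u < n → d.getD u 0 = w.getD u 0 := by
    intro u hu
    rw [hd, pvD]
    exact List.getD_append _ _ _ _ hu
  have haux : ((List.range m).map (fun k => -(2 ^ k : Int))).length = m := by
    simp
  have hdk : ∀ k, k < m → d.getD (n + k) 0 = -(2 ^ k : Int) := by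
    intro k hk
    rw [hd, pvD, List.getD_append_right _ _ _ _ (by omega : w.length ≤ n + k)]
    rw [show n + k - w.length = k from by omega]
    rw [List.getD_append _ _ _ _ (by rw [haux]; exact hk)]
    simp [List.getD_eq_getElem?_getD, List.getElem?_map, List.getElem?_range hk]
  have hdr : d.getD (n + m) 0 = -rem := by
    rw [hd, pvD, List.getD_append_right _ _ _ _ (by omega : w.length ≤ n + m)]
    rw [List.getD_append_right _ _ _ _ (by rw [haux]; omega)]
    rw [haux, show n + m - w.length - m = 0 from by omega]
    rfl
  have hsplit : List.range (n + m + 1)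
      = List.range n ++ ((List.range m).map (fun i => n + i) ++ [n + m]) := by
    rw [show n + m + 1 = n + (m + 1) from by omega, List.range_add, List.range_succ]
    simp
  rw [hsplit, List.flatMap_append, List.flatMap_append]
  congr 1
  · -- item rows
    refine List.flatMap_congr ?_
    intro i hi
    have hi' : i < n := List.mem_range.mp hi
    have hr : List.range' (i+1) (n + m + 1 - (i+1))
        = List.range' (i+1) (n-(i+1)) ++ (List.range' n m ++ [n+m]) := by
      rw [show n + m + 1 - (i+1) = (n-(i+1)) + (m+1) from by omega, ← List.range'_append]
      rw [show (i+1)+1*(n-(i+1)) = n from by omega]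
      congr 1
      rw [← List.range'_append, show n+1*m = n+m from by omega, List.range'_one]
    rw [hr, List.map_append, List.map_append]
    rw [if_pos hi', hdw i hi']
    congr 1
    · -- diagonal entry
      simp only [Prod.mk.injEq, true_and]
      ring
    congr 1
    · -- item-item entries
      refine List.map_congr_left ?_
      intro j hj
      obtain ⟨t, ht, rfl⟩ := List.mem_range'.mp hj
      rw [hdw (i+1+1*t) (by omega)]
    congr 1
    · -- item-aux entries
      rw [List.range'_eq_map_range, List.map_map]
      refine List.map_congr_left ?_
      intro k hk
      have hk' : k < m := List.mem_range.mp hk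
      simp only [Function.comp_apply]
      rw [hdk k hk', Nat.add_comm k n]
      exact congrArg (Prod.mk _) (by ring)
    · -- item-remainder entry
      simp only [List.map_cons, List.map_nil]
      rw [hdr]
      exact congrArg (fun x => [x]) (congrArg (Prod.mk _) (by ring))
  congr 1
  · -- aux rows
    rw [List.flatMap_map]
    refine List.flatMap_congr ?_
    intro i hi
    have hi' : i < m := List.mem_range.mp hi
    have hr : List.range' (n+i+1) (n + m + 1 - (n+i+1))
        = List.range' (n+i+1) (m-(i+1)) ++ [n+m] := by
      rw [show n + m + 1 - (n+i+1) = (m-(i+1)) + 1 from by omega, ← List.range'_append]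
      rw [show (n+i+1)+1*(m-(i+1)) = n+m from by omega, List.range'_one]
    rw [if_neg (by omega : ¬ n + i < n), hr, List.map_append]
    rw [hdk i hi']
    congr 1
    · -- aux diagonal entry
      rw [Nat.add_comm i n]
      refine congrArg (Prod.mk _) ?_
      rw [two_mul, pow_add]
      ring
    congr 1
    · -- aux-aux entries
      rw [List.range'_eq_map_range, List.range'_eq_map_range, List.map_map, List.map_map]
      refine List.map_congr_left ?_
      intro k hk
      have hk' : k < m - (i+1) := List.mem_range.mp hk
      simp only [Function.comp_apply]
      rw [show n+i+1+k = n+(i+1+k) from by omega, hdk (i+1+k) (by omega)]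
      rw [Nat.add_comm i n, Nat.add_comm (i+1+k) n]
      refine congrArg (Prod.mk _) ?_
      rw [show i+(i+1+k)+1 = (i+1) + (i+1+k) from by omega, pow_add]
      ring
    · -- aux-remainder entry
      simp only [List.map_cons, List.map_nil]
      rw [hdr, Nat.add_comm i n]
      exact congrArg (fun x => [x]) (congrArg (Prod.mk _) (by ring))
  · -- remainder row
    simp only [List.flatMap_cons, List.flatMap_nil]
    rw [if_neg (by omega : ¬ n + m < n), hdr]
    rw [show n + m + 1 - (n+m+1) = 0 from by omega]
    simp only [List.range'_zero, List.map_nil, List.append_nil]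
    exact congrArg (fun x => [x]) (congrArg (Prod.mk _) (by ring))

-- ---------- row-major structure ----------

lemma pvRows_eq_map (w p : List Int) (m : Nat) (rem a b : Int) :
    pvRows w p m rem a b
      = (pvKeysRowN (w.length + m + 1)).map
          (fun q => (((q.1 : Int), (q.2 : Int)), pvVal (pvD w m rem) p a b w.length q)) := by
  unfold pvRows pvKeysRowN
  simp only [List.map_flatMap]
  refine List.flatMap_congr ?_
  intro u hu
  rw [show (w.length + m + 1 - u) = (w.length + m + 1 - (u+1)) + 1 from
    by have := List.mem_range.mp hu; omega, List.range'_succ]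
  simp only [List.map_cons, List.map_map]
  congr 1
  · simp [pvVal]
  · refine List.map_congr_left ?_
    intro v hv
    obtain ⟨t, _, rfl⟩ := List.mem_range'.mp hv
    simp only [Function.comp_apply, pvVal]
    rw [if_neg (by omega : ¬ u = u + 1 + 1 * t)]

lemma pvMem_keysRowN (N : Nat) (q : Nat × Nat) :
    q ∈ pvKeysRowN N ↔ q.1 ≤ q.2 ∧ q.2 < N := by
  unfold pvKeysRowN
  simp only [List.mem_flatMap, List.mem_map, List.mem_range, List.mem_range'_1]
  constructor
  · rintro ⟨u, hu, v, hv, rfl⟩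
    exact ⟨by omega, by omega⟩
  · rintro ⟨h1, h2⟩
    exact ⟨q.1, by omega, q.2, ⟨by omega, by omega⟩, by simp⟩

lemma pvPairwise_keysRowN (N : Nat) :
    (pvKeysRowN N).Pairwise (fun q r => q.1 < r.1 ∨ (q.1 = r.1 ∧ q.2 < r.2)) := by
  unfold pvKeysRowN
  rw [List.pairwise_flatMap]
  constructor
  · intro u _
    rw [List.pairwise_map]
    exact (List.pairwise_lt_range' (s := u) (n := N - u)).imp (fun h => Or.inr ⟨rfl, h⟩)
  · have hlt : (List.range N).Pairwise (· < ·) := List.pairwise_lt_range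
    refine hlt.imp ?_
    intro u u' h x hx y hy
    simp only [List.mem_map] at hx hy
    obtain ⟨v, _, rfl⟩ := hx
    obtain ⟨v', _, rfl⟩ := hy
    exact Or.inl h

lemma pvRows_pairwise (w p : List Int) (m : Nat) (rem a b : Int) :
    (pvRows w p m rem a b).Pairwise (fun e f => pvKeyL e < pvKeyL f) := by
  rw [pvRows_eq_map, List.pairwise_map]
  refine (pvPairwise_keysRowN _).imp ?_
  intro q r h
  simp only [pvKeyL]
  rw [Prod.Lex.lt_iff]
  simp only [ofLex_toLex]
  rcases h with h | ⟨h1, h2⟩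
  · exact Or.inl (by exact_mod_cast h)
  · exact Or.inr ⟨by exact_mod_cast h1, by exact_mod_cast h2⟩

lemma pvRows_keys_nodup (w p : List Int) (m : Nat) (rem a b : Int) :
    ((pvRows w p m rem a b).map (·.1)).Nodup := by
  have h := pvRows_pairwise w p m rem a b
  have h2 : ((pvRows w p m rem a b).map (·.1)).Pairwise
      (fun k k' : Int × Int => (toLex k : Int ×ₗ Int) < toLex k') := by
    rw [List.pairwise_map]
    exact h
  have h3 : ((pvRows w p m rem a b).map (·.1)).Pairwise (· ≠ ·) :=
    h2.imp (fun hlt he => by cases he; exact lt_irrefl _ hlt)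
  exact h3

-- ---------- generic accumulation lemmas ----------

lemma pvGetD_foldl {β : Type} (l : List β) (key : β → Int × Int) (c : β → Int)
    (q0 : PySem.Dict (Int × Int) Int) (k : Int × Int) :
    (l.foldl (fun q x => q.insert (key x) (q.getD (key x) 0 + c x)) q0).getD k 0
      = q0.getD k 0 + ((l.filter (fun x => key x == k)).map c).sum := by
  induction l generalizing q0 with
  | nil => simp
  | cons x t ih =>
    simp only [List.foldl_cons, ih, List.filter_cons]
    by_cases h : key x = k
    · rw [h]
      simp only [beq_self_eq_true, if_true, List.map_cons, List.sum_cons,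
        PySem.Dict.getD_insert_self]
      omega
    · have hb : (key x == k) = false := by simp [h]
      rw [hb]
      simp only [Bool.false_eq_true, if_false, PySem.Dict.getD_insert]
      rw [if_neg (fun he : k = key x => h he.symm)]

lemma pvFlatMapSingle {α : Type} (N j : Nat) (g : Nat → List α) (hj : j < N)
    (h : ∀ v, v < N → v ≠ j → g v = []) : (List.range N).flatMap g = g j := by
  induction N with
  | zero => omega
  | succ M ih =>
    rw [List.range_succ, List.flatMap_append, List.flatMap_cons, List.flatMap_nil,
      List.append_nil]
    by_cases hjM : j = M
    · have hz : (List.range M).flatMap g = [] := by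
        apply List.flatMap_eq_nil_iff.mpr
        intro v hv
        have hv' : v < M := List.mem_range.mp hv
        exact h v (by omega) (by omega)
      rw [hz, List.nil_append, hjM]
    · rw [ih (by omega) (fun v hv hvj => h v (by omega) hvj),
        h M (by omega) (fun he => hjM he.symm), List.append_nil]

lemma pvFlatMapPair {α : Type} (N j1 j2 : Nat) (g : Nat → List α) (h12 : j1 < j2) (h2 : j2 < N)
    (h : ∀ v, v < N → v ≠ j1 → v ≠ j2 → g v = []) :
    (List.range N).flatMap g = g j1 ++ g j2 := by
  induction N with
  | zero => omega
  | succ M ih =>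
    rw [List.range_succ, List.flatMap_append, List.flatMap_cons, List.flatMap_nil,
      List.append_nil]
    by_cases hjM : j2 = M
    · rw [pvFlatMapSingle M j1 g (by omega)
        (fun v hv hvj => h v (by omega) hvj (by omega)), hjM]
    · rw [ih (by omega) (fun v hv hv1 hv2 => h v (by omega) hv1 hv2),
        h M (by omega) (by omega) (fun he => hjM he.symm), List.append_nil]

lemma pvRangeFilterSingle (N x : Nat) (p : Nat → Bool) (hx : x < N)
    (hp : ∀ u, p u = true ↔ u = x) : (List.range N).filter p = [x] := by
  have he : (List.range N).filter p = (List.range N).filter (fun u => u == x) := by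
    apply List.filter_congr
    intro u _
    cases hpu : p u with
    | false =>
      symm
      simp only [beq_eq_false_iff_ne, ne_eq]
      intro hux
      exact absurd ((hp u).mpr hux) (by simp [hpu])
    | true =>
      symm
      simp only [beq_iff_eq]
      exact (hp u).mp hpu
  rw [he, List.filter_beq, List.count_eq_one_of_mem List.nodup_range (List.mem_range.mpr hx)]
  rfl

lemma pvRangeFilterNil (N : Nat) (p : Nat → Bool) (hp : ∀ u, u < N → p u = false) :
    (List.range N).filter p = [] :=
  List.filter_eq_nil_iff.mpr (fun u hu => by simp [hp u (List.mem_range.mp hu)])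

-- ---------- the filtered product ----------

lemma pvPred_iff (u v x y : Nat) :
    (pvKey (u, v) == ((x : Int), (y : Int))) = true ↔ (min u v = x ∧ max u v = y) := by
  simp only [pvKey, beq_iff_eq, Prod.mk.injEq]
  omega

lemma pvPred_false (u v x y : Nat) (hn : ¬ (min u v = x ∧ max u v = y)) :
    (pvKey (u, v) == ((x : Int), (y : Int))) = false := by
  cases hb : (pvKey (u, v) == ((x : Int), (y : Int))) with
  | false => rfl
  | true => exact absurd ((pvPred_iff u v x y).mp hb) hn

lemma pvFilter_pairs (N x y : Nat) (hxy : x ≤ y) (hy : y < N) :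
    (pvPairs N).filter (fun q => pvKey q == ((x : Int), (y : Int)))
      = if x = y then [(x, x)] else [(y, x), (x, y)] := by
  unfold pvPairs
  rw [List.filter_flatMap]
  have hrow : ∀ v : Nat,
      ((List.range N).map (fun u => (u, v))).filter (fun q => pvKey q == ((x : Int), (y : Int)))
        = ((List.range N).filter (fun u => pvKey (u, v) == ((x : Int), (y : Int)))).map
            (fun u => (u, v)) := by
    intro v
    rw [List.filter_map]
    rfl
  by_cases hd : x = y
  · subst hd
    rw [if_pos rfl]
    rw [pvFlatMapSingle N x _ (by omega) ?_]
    · rw [hrow, pvRangeFilterSingle N x _ (by omega)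
        (fun u => by rw [pvPred_iff]; omega)]
      rfl
    · intro v hv hvx
      rw [hrow, pvRangeFilterNil N _ (fun u _ => pvPred_false u v x x (by omega))]
      rfl
  · have hlt : x < y := by omega
    rw [if_neg hd]
    rw [pvFlatMapPair N x y _ hlt hy ?_]
    · rw [hrow, hrow,
        pvRangeFilterSingle N y _ (by omega) (fun u => by rw [pvPred_iff]; omega),
        pvRangeFilterSingle N x _ (by omega) (fun u => by rw [pvPred_iff]; omega)]
      rfl
    · intro v hv hv1 hv2
      rw [hrow, pvRangeFilterNil N _ (fun u _ => pvPred_false u v x y (by omega))]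
      rfl

-- ---------- values of the accumulator ----------

lemma pvAcc1_getD (d : List Int) (a : Int) (N x y : Nat) (hxy : x ≤ y) (hy : y < N) :
    (pvAcc1 d a N).getD ((x : Int), (y : Int)) 0
      = if x = y then a * d.getD x 0 * d.getD x 0 else 2 * a * d.getD x 0 * d.getD y 0 := by
  unfold pvAcc1
  rw [pvGetD_foldl, pvFilter_pairs N x y hxy hy, PySem.Dict.getD_empty]
  by_cases hd : x = y
  · subst hd
    rw [if_pos rfl, if_pos rfl]
    simp [pvCoef]
  · rw [if_neg hd, if_neg hd]
    simp only [List.map_cons, List.map_nil, List.sum_cons, List.sum_nil, pvCoef,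
      add_zero, zero_add]
    ring

lemma pvAcc_getD (d p : List Int) (a b : Int) (n N x y : Nat) (hxy : x ≤ y) (hy : y < N) :
    (pvAcc d p a b n N).getD ((x : Int), (y : Int)) 0 = pvVal d p a b n (x, y) := by
  unfold pvAcc
  rw [pvGetD_foldl, pvAcc1_getD d a N x y hxy hy]
  by_cases hdg : x = y ∧ x < n
  · obtain ⟨he, hn⟩ := hdg
    subst he
    rw [pvRangeFilterSingle n x _ hn (fun i => by
      simp only [pvDKey, beq_iff_eq, Prod.mk.injEq, Nat.cast_inj]
      omega)]
    simp [pvVal, hn]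
    ring
  · rw [pvRangeFilterNil n _ (fun i hi => by
      cases hb : (pvDKey i == ((x : Int), (y : Int))) with
      | false => rfl
      | true =>
        exfalso
        have hixy : (i : Int) = (x : Int) ∧ (i : Int) = (y : Int) := by
          simpa only [pvDKey, beq_iff_eq, Prod.mk.injEq] using hb
        omega)]
    by_cases he : x = y
    · subst he
      have hxn : ¬ x < n := fun hxn => hdg ⟨rfl, hxn⟩
      simp [pvVal, hxn]
    · simp [pvVal, he]

-- ---------- keys of the accumulator ----------

lemma pvSet_update_of_mem (l : List (Int × Int)) (s : PySem.Set (Int × Int))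
    (h : ∀ x ∈ l, x ∈ s) : PySem.Set.update s l = s := by
  induction l generalizing s with
  | nil => rfl
  | cons x t ih =>
    have hx : PySem.Set.add s x = s := by
      unfold PySem.Set.add PySem.Set.contains
      simp [h x (by simp)]
    show List.foldl PySem.Set.add s (x :: t) = s
    rw [List.foldl_cons, hx]
    exact ih s (fun y hy => h y (by simp [hy]))

lemma pvMem_pairs (N : Nat) (q : Nat × Nat) : q ∈ pvPairs N ↔ q.1 < N ∧ q.2 < N := by
  unfold pvPairs
  simp only [List.mem_flatMap, List.mem_map, List.mem_range]
  constructor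
  · rintro ⟨v, hv, u, hu, rfl⟩
    exact ⟨hu, hv⟩
  · rintro ⟨h1, h2⟩
    exact ⟨q.2, h2, q.1, h1, by simp⟩

lemma pvAcc1_keys (d : List Int) (a : Int) (N : Nat) :
    (pvAcc1 d a N).keys = PySem.Set.ofList ((pvPairs N).map pvKey) := by
  unfold pvAcc1
  rw [PySem.Dict.keys_foldl_insert_key _ pvKey
    (fun q x => q.getD (pvKey x) 0 + pvCoef d a x), PySem.Dict.keys_empty,
    PySem.Set.ofList_eq_foldl]
  rfl

lemma pvAcc_keys (d p : List Int) (a b : Int) (n N : Nat) (hn : n ≤ N) :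
    (pvAcc d p a b n N).keys = PySem.Set.ofList ((pvPairs N).map pvKey) := by
  unfold pvAcc
  rw [PySem.Dict.keys_foldl_insert_key _ pvDKey
    (fun q i => q.getD (pvDKey i) 0 + -(b * p.getD i 0)), pvAcc1_keys]
  apply pvSet_update_of_mem
  intro x hx
  simp only [List.mem_map, List.mem_range] at hx
  obtain ⟨i, hi, rfl⟩ := hx
  rw [PySem.Set.mem_ofList]
  refine List.mem_map.mpr ⟨(i, i), (pvMem_pairs N (i, i)).mpr ⟨by omega, by omega⟩, ?_⟩
  simp [pvKey, pvDKey]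

lemma pvAcc_nodup (d p : List Int) (a b : Int) (n N : Nat) :
    (pvAcc d p a b n N).keys.Nodup := by
  unfold pvAcc pvAcc1
  apply PySem.Dict.nodup_keys_foldl_insert_key
  apply PySem.Dict.nodup_keys_foldl_insert_key
  simp [PySem.Dict.keys_empty]

-- ---------- the permutation ----------

lemma pvCastPair_inj : Function.Injective (fun q : Nat × Nat => (((q.1 : Nat) : Int), ((q.2 : Nat) : Int))) := by
  intro q r he
  have h1 : ((q.1 : Nat) : Int) = ((r.1 : Nat) : Int) := congrArg Prod.fst he
  have h2 : ((q.2 : Nat) : Int) = ((r.2 : Nat) : Int) := congrArg Prod.snd he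
  have h1' : q.1 = r.1 := by exact_mod_cast h1
  have h2' : q.2 = r.2 := by exact_mod_cast h2
  exact Prod.ext_iff.mpr ⟨h1', h2'⟩

lemma pvItems_perm (w p : List Int) (m : Nat) (rem a b : Int) :
    (pvRows w p m rem a b).Perm
      (pvAcc (pvD w m rem) p a b w.length (w.length + m + 1)).items := by
  set n := w.length with hn
  set N := n + m + 1 with hN
  set d := pvD w m rem with hd
  have hnN : n ≤ N := by omega
  have hitems : (pvAcc d p a b n N).items
      = ((pvAcc d p a b n N).keys).map (fun k => (k, (pvAcc d p a b n N).getD k 0)) :=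
    PySem.Dict.items_eq_map_keys _ (pvAcc_nodup d p a b n N) 0
  rw [hitems, pvAcc_keys d p a b n N hnN]
  have hTnodup : ((pvKeysRowN N).map (fun q => ((q.1 : Int), (q.2 : Int)))).Nodup := by
    have hnd : (pvKeysRowN N).Nodup := by
      have := (pvPairwise_keysRowN N).imp
        (S := (· ≠ ·)) (fun hr he => by cases he; omega)
      exact this
    exact List.Nodup.map pvCastPair_inj hnd
  have hkperm : (PySem.Set.ofList ((pvPairs N).map pvKey)).Perm
      ((pvKeysRowN N).map (fun q => ((q.1 : Int), (q.2 : Int)))) := by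
    rw [List.perm_ext_iff_of_nodup (PySem.Set.nodup_ofList _) hTnodup]
    intro z
    rw [PySem.Set.mem_ofList]
    simp only [List.mem_map]
    constructor
    · rintro ⟨q, hq, rfl⟩
      obtain ⟨h1, h2⟩ := (pvMem_pairs N q).mp hq
      refine ⟨(min q.1 q.2, max q.1 q.2),
        (pvMem_keysRowN N _).mpr ⟨by dsimp only; omega, by dsimp only; omega⟩, ?_⟩
      simp [pvKey]
    · rintro ⟨q, hq, rfl⟩
      obtain ⟨h1, h2⟩ := (pvMem_keysRowN N q).mp hq
      refine ⟨(q.1, q.2), (pvMem_pairs N _).mpr ⟨by omega, by omega⟩, ?_⟩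
      have hmin : min q.1 q.2 = q.1 := by omega
      have hmax : max q.1 q.2 = q.2 := by omega
      simp [pvKey, hmin, hmax]
  refine List.Perm.symm ?_
  have hstep : (((pvKeysRowN N).map (fun q => ((q.1 : Int), (q.2 : Int)))).map
      (fun k => (k, (pvAcc d p a b n N).getD k 0))) = pvRows w p m rem a b := by
    rw [List.map_map, pvRows_eq_map]
    refine List.map_congr_left ?_
    intro q hq
    obtain ⟨h1, h2⟩ := (pvMem_keysRowN N q).mp hq
    simp only [Function.comp_apply]
    rw [pvAcc_getD d p a b n N q.1 q.2 h1 h2]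
  exact hstep ▸ hkperm.map (fun k => (k, (pvAcc d p a b n N).getD k 0))

-- ---------- sorting ----------

lemma pvSorted2_eq {α : Type} (xs : List α) (k1 k2 : α → Int) :
    PySem.List.sorted2 xs k1 k2
      = PySem.List.sorted xs (fun x => (toLex (k1 x, k2 x) : Int ×ₗ Int)) := by
  rw [PySem.List.sorted_eq_foldl_insertBy]
  show List.foldl (fun acc x => PySem.List.insertBy
      (fun a b => decide (k1 a < k1 b) || (!decide (k1 b < k1 a) && decide (k2 a < k2 b)))
      x acc) [] xs = _
  congr 1
  funext acc x
  congr 1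
  funext e f
  rw [Bool.eq_iff_iff]
  simp only [Bool.or_eq_true, Bool.and_eq_true, Bool.not_eq_true', decide_eq_true_eq,
    decide_eq_false_iff_not, Prod.Lex.lt_iff, ofLex_toLex]
  omega

lemma pvOfList_items (l : List ((Int × Int) × Int)) (h : (l.map (·.1)).Nodup) :
    (PySem.Dict.ofList l).items = l := by
  unfold PySem.Dict.ofList PySem.Dict.update
  rw [PySem.Dict.items_foldl_insert_fresh l (fun p => p.1) (fun p => p.2) _
    (fun x _ => PySem.Dict.contains_empty _) h]
  simp [PySem.Dict.empty]

lemma pvFoldl_pvIns_eq_ofList (l : List ((Int × Int) × Int)) :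
    l.foldl pvIns PySem.Dict.empty = PySem.Dict.ofList l := rfl

-- ---------- the two sides ----------

lemma pvB_eq (w p : List Int) (c a b : Int) :
    build_knapsack_with_aux_alt w p c a b
      = (PySem.Dict.ofList (PySem.List.sorted2
          (pvAcc (pvD w (PySem.Int.bitLength c - 1) (c - (2 ^ (PySem.Int.bitLength c - 1) - 1)))
            p a b w.length (w.length + (PySem.Int.bitLength c - 1) + 1)).items
          (fun kv => kv.1.1) (fun kv => kv.1.2))).items.map (fun kv => (kv.1.1, kv.1.2, kv.2)) := by
  simp only [build_knapsack_with_aux_alt, pvAcc, pvAcc1, pvPairs, pvD, pvKey, pvCoef, pvDKey,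
    List.foldl_flatMap, List.foldl_map, sub_eq_add_neg]

lemma pvSorted_acc (w p : List Int) (m : Nat) (rem a b : Int) :
    PySem.List.sorted2 (pvAcc (pvD w m rem) p a b w.length (w.length + m + 1)).items
        (fun kv => kv.1.1) (fun kv => kv.1.2)
      = pvRows w p m rem a b := by
  rw [pvSorted2_eq]
  refine PySem.List.sorted_eq_of_perm_of_pairwise_lt _ _ _ (pvItems_perm w p m rem a b) ?_
  exact pvRows_pairwise w p m rem a b

-- ===== VERDICT (by name: the statement is the Claim_ definition above) =====
theorem build_knapsack_with_aux_spec : Claim_equal_build_knapsack_with_aux := by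
  intro w p c a b _ hpre
  unfold Spec_build_knapsack_with_aux
  rw [pvA_eq_ops, pvB_eq, pvM_eq c hpre.1, pvOps_eq, pvFoldl_pvIns_eq_ofList, pvSorted_acc,
    pvOfList_items _ (pvRows_keys_nodup ..)]
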